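-- pv_equiv track=rewrite | github.com/hippieperm/Coding-Test | 프로그래머스/0/181874. A 강조하기/A 강조하기.py | solution
-- ===== SOURCE A (Python) =====
-- def solution(myString):
--     answer = ''
--     for element in myString:
--         if element == 'a' or element == 'A':
--             answer += element.upper()
--         else:
--             answer += element.lower()
--     return answer
-- ===== SOURCE B (Python) =====
-- def solution(myString):
--     return myString.lower().replace('a', 'A')
-- ===== Notes on version B (the rewrite author's own statement) =====
-- stated objective: simpler
-- what changed: Replaces the per-character if/else accumulation loop with two whole-string passes: lowercase everything, then replace every occurrence of the lowercase letter with its uppercase form.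
import Mathlib
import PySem

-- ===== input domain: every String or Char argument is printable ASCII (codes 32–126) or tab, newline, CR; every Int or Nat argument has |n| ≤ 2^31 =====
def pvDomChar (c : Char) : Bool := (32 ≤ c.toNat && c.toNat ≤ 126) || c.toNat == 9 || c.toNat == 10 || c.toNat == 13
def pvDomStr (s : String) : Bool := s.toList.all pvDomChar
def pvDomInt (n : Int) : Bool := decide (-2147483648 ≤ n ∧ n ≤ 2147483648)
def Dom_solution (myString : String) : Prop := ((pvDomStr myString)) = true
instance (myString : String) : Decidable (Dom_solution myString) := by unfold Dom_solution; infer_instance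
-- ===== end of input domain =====

-- B lowercases the whole string and then replaces 'a' with 'A' (two whole-string passes
-- instead of A's per-character if/else accumulation loop); objective: simpler.


-- ===== PORT A =====
-- answer starts empty; for each character append its upper() if it is 'a' or 'A', else its lower()
def solution (myString : String) : String :=
  String.ofList (myString.toList.foldl
    (fun answer element =>
      if element == 'a' || element == 'A' then
        answer ++ PySem.Chars.upper [element]
      else
        answer ++ PySem.Chars.lower [element]) [])

-- ===== PORT B =====
def solution_alt (myString : String) : String :=
  PySem.Str.replace (PySem.Str.lower myString) "a" "A"

-- ===== PRECONDITION & SPEC =====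
def Spec_solution (myString : String) (out : String) : Prop := out = solution_alt myString
instance (myString : String) (out : String) : Decidable (Spec_solution myString out) := by unfold Spec_solution; infer_instance

-- ===== CLAIM (what is proved, stated in full; the proofs are below) =====
def Claim_equal_solution : Prop := ∀ (myString : String), Dom_solution myString → Spec_solution myString (solution myString)

-- ===== LEMMAS AND PROOFS =====

-- single-character replace is a map
theorem replace_go_single (a b : Char) (fuel : Nat) (l acc : List Char)
    (h : l.length ≤ fuel) :
    PySem.Chars.replace.go [a] [b] fuel l acc
      = acc.reverse ++ l.map (fun c => if c = a then b else c) := by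
  induction fuel generalizing l acc with
  | zero =>
    interval_cases hl : l.length
    · simp at hl; subst hl; simp [PySem.Chars.replace.go]
  | succ fuel ih =>
    cases l with
    | nil => simp [PySem.Chars.replace.go]
    | cons c t =>
      simp only [PySem.Chars.replace.go, List.isPrefixOf]
      by_cases hc : c = a
      · subst hc
        simp only [BEq.rfl, Bool.true_and, if_pos]
        simp only [List.length_cons, List.length_nil, List.drop_succ_cons, List.drop_zero,
          List.reverse_cons, List.reverse_nil, List.nil_append]
        rw [ih t ([b] ++ acc) (by simpa using Nat.le_of_succ_le_succ (by simpa using h))]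
        simp only [List.map_cons, if_true, List.reverse_cons, List.append_assoc,
          List.singleton_append]
      · rw [if_neg (by simpa [beq_iff_eq] using fun hh => hc hh.symm)]
        rw [ih t (c :: acc) (by simpa using Nat.le_of_succ_le_succ (by simpa using h))]
        simp only [List.reverse_cons, List.map_cons, if_neg hc, List.append_assoc,
          List.singleton_append]

theorem replace_single (a b : Char) (l : List Char) :
    PySem.Chars.replace l [a] [b] = l.map (fun c => if c = a then b else c) := by
  have := replace_go_single a b l.length l [] le_rfl
  simpa [PySem.Chars.replace] using this

theorem char_case (c : Char) :
    (if PySem.Chars.lowerChar c = 'a' then 'A' else PySem.Chars.lowerChar c)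
      = (if c == 'a' || c == 'A' then PySem.Chars.upperChar c else PySem.Chars.lowerChar c) := by
  by_cases ha : c = 'a'
  · subst ha; decide
  by_cases hA : c = 'A'
  · subst hA; decide
  · rw [if_neg (show ¬((c == 'a' || c == 'A') = true) by simp [ha, hA])]
    rw [if_neg]
    unfold PySem.Chars.lowerChar
    split_ifs with hu
    · intro hofn
      apply hA
      have h1 : PySem.Chars.isupper c = true := hu
      simp only [PySem.Chars.isupper, Bool.and_eq_true, decide_eq_true_eq] at h1
      have hub : c.toNat ≤ 90 := Char.le_def.mp h1.2
      have hv : (Char.ofNat (c.toNat + 32)).toNat = c.toNat + 32 := by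
        unfold Char.ofNat
        rw [dif_pos]
        · rfl
        · exact Or.inl (by exact_mod_cast (by omega : c.toNat + 32 < 55296))
      have h97 : c.toNat + 32 = 97 := by
        have := congrArg Char.toNat hofn
        rw [hv] at this
        exact this
      have h65 : c.toNat = 65 := by omega
      have h2 := Char.ofNat_toNat c
      rw [h65] at h2
      exact h2.symm
    · exact ha

-- ===== VERDICT (by name: the statement is the Claim_ definition above) =====
theorem solution_spec : Claim_equal_solution := by
  intro s _
  unfold Spec_solution solution solution_alt
  apply String.ext
  rw [PySem.Str.toList_replace]
  simp only [PySem.Str.toList_lower, String.toList_ofList]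
  show _ = PySem.Chars.replace (PySem.Chars.lower s.toList) ['a'] ['A']
  rw [replace_single]
  have hfun : (fun (answer : List Char) element =>
      if (element == 'a' || element == 'A') = true then answer ++ PySem.Chars.upper [element]
      else answer ++ PySem.Chars.lower [element])
    = (fun (answer : List Char) element =>
      answer ++ (if (element == 'a' || element == 'A') = true then PySem.Chars.upper [element]
                 else PySem.Chars.lower [element])) := by
    funext a e; split <;> rfl
  rw [hfun, PySem.List.foldl_append_eq_flatMap]
  have hsing : (fun element =>
      if (element == 'a' || element == 'A') = true then PySem.Chars.upper [element]
      else PySem.Chars.lower [element])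
    = (fun element => [if (element == 'a' || element == 'A') = true then
        PySem.Chars.upperChar element else PySem.Chars.lowerChar element]) := by
    funext e; split <;> rfl
  rw [hsing]
  have hmap := List.flatMap_singleton' (l := s.toList.map (fun element =>
      if (element == 'a' || element == 'A') = true then
        PySem.Chars.upperChar element else PySem.Chars.lowerChar element))
  rw [show List.flatMap (fun element => [if (element == 'a' || element == 'A') = true then
        PySem.Chars.upperChar element else PySem.Chars.lowerChar element]) s.toList
      = s.toList.map (fun element =>
      if (element == 'a' || element == 'A') = true then
        PySem.Chars.upperChar element else PySem.Chars.lowerChar element) by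
    rw [← hmap, List.flatMap_map]]
  simp only [PySem.Chars.lower, List.map_map, List.nil_append]
  exact List.map_congr_left (fun c _ => by
    simpa [Function.comp] using (char_case c).symm)
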